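-- pv_equiv track=rewrite | github.com/Pelmesh/EYAZIS | 2/main.py | sum_number
-- ===== SOURCE A (Python) =====
-- def sum_number(new_l, text_list):
--     q = 0
--     for i in range(len(text_list)):
--         for j in range(len(new_l)):
--             if text_list[i] == new_l[j]:
--                 k = abs(i - j)
--                 if k > 5:
--                     q += 5
--                 else:
--                     q += k
--     return q
-- ===== SOURCE B (Python) =====
-- def sum_number(new_l, text_list):
--     count = {}
--     for w in new_l:
--         count[w] = count.get(w, 0) + 1
--     present = set()
--     for j, w in enumerate(new_l):
--         present.add((w, j))
--     q = 0
--     for i, w in enumerate(text_list):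
--         if w in count:
--             q += 5 * count[w]
--             for d in range(-5, 6):
--                 if (w, i + d) in present:
--                     q -= 5 - abs(d)
--     return q
-- ===== Notes on version B (the rewrite author's own statement) =====
-- stated objective: faster
-- what changed: B builds a word-count dict and a set of (word, position) pairs over new_l once, then for each text position adds 5 per matching word and corrects only inside the constant 11-wide window |i-j| <= 5, instead of A's full nested scan over every (i,j) pair.
import Mathlib
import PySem

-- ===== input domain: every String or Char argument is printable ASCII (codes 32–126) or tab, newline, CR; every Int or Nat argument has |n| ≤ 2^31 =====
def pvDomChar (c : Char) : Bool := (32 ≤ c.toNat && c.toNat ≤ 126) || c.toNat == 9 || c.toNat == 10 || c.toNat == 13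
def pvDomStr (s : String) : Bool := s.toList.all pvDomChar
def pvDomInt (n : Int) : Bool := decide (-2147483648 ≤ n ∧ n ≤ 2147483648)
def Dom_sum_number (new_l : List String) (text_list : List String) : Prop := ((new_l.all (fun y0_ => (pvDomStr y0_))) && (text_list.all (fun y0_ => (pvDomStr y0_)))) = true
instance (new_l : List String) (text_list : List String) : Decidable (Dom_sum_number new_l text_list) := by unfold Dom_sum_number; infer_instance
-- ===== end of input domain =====

-- B replaces A's full nested scan by a word→count dict plus a set of (word, position) pairs,
-- adding 5 per match and correcting only inside the constant 11-wide window |i-j| ≤ 5.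

-- ===== PORT A =====
def sum_number (new_l : List String) (text_list : List String) : Int :=
  (PySem.List.pyRange 0 text_list.length 1).foldl (fun q i =>
    (PySem.List.pyRange 0 new_l.length 1).foldl (fun q j =>
      if PySem.List.pyGetD text_list i "" = PySem.List.pyGetD new_l j "" then
        let k := |i - j|
        if k > 5 then q + 5 else q + k
      else q) q) 0

-- ===== PORT B =====
def sum_number_alt (new_l : List String) (text_list : List String) : Int :=
  let count : PySem.Dict String Int :=
    new_l.foldl (fun d w => d.insert w (d.getD w 0 + 1)) PySem.Dict.empty
  let present : PySem.Set (String × Int) :=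
    (PySem.List.enumerate new_l 0).foldl (fun s p => PySem.Set.add s (p.2, p.1)) PySem.Set.empty
  (PySem.List.enumerate text_list 0).foldl (fun q p =>
    if count.contains p.2 then
      (PySem.List.pyRange (-5) 6 1).foldl
        (fun q d => if (p.2, p.1 + d) ∈ present then q - (5 - |d|) else q)
        (q + 5 * count.getD p.2 0)
    else q) 0

-- ===== PRECONDITION & SPEC =====
def Spec_sum_number (new_l : List String) (text_list : List String) (out : Int) : Prop := out = sum_number_alt new_l text_list
instance (new_l : List String) (text_list : List String) (out : Int) : Decidable (Spec_sum_number new_l text_list out) := by unfold Spec_sum_number; infer_instance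

-- ===== CLAIM (what is proved, stated in full; the proofs are below) =====
def Claim_equal_sum_number : Prop := ∀ (new_l : List String) (text_list : List String), Dom_sum_number new_l text_list → Spec_sum_number new_l text_list (sum_number new_l text_list)

-- ===== LEMMAS AND PROOFS =====

-- value added for one (i, j) pair when text word w meets the indexed pair p = (j, word)
def pvTerm (w : String) (i : Int) (p : Int × String) : Int :=
  if w = p.2 then min (|i - p.1|) 5 else 0

-- A's inner loop over an enumerate-style pair list adds the guarded terms
theorem pv_innerA (w : String) (i : Int) (l : List (Int × String)) (q : Int) :
    l.foldl (fun q p =>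
        if w = p.2 then (if |i - p.1| > 5 then q + 5 else q + |i - p.1|) else q) q
      = q + (l.map (pvTerm w i)).sum := by
  induction l generalizing q with
  | nil => simp
  | cons p l ih =>
      simp only [List.foldl_cons, List.map_cons, List.sum_cons, ih]
      unfold pvTerm
      by_cases h : w = p.2
      · by_cases h5 : |i - p.1| > 5
        · simp [h, h5, min_def]; omega
        · simp [h, h5, min_def]; omega
      · simp [h]

theorem sum_number_eq (new_l : List String) (text_list : List String) :
    sum_number new_l text_list
      = (PySem.List.enumerate text_list 0).foldl (fun q p =>
          q + ((PySem.List.enumerate new_l 0).map (pvTerm p.2 p.1)).sum) 0 := by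
  unfold sum_number
  rw [PySem.List.enumerate_eq_map_pyRange (xs := text_list) (d := ""), List.foldl_map]
  refine List.foldl_ext _ _ 0 (fun q i _ => ?_)
  have h := pv_innerA (PySem.List.pyGetD text_list i "") i (PySem.List.enumerate new_l 0) q
  rw [PySem.List.enumerate_eq_map_pyRange (xs := new_l) (d := ""), List.foldl_map] at h
  rw [PySem.List.enumerate_eq_map_pyRange (xs := new_l) (d := ""), List.map_map]
  simpa using h

-- a subtracting loop is the start value minus the sum of the guarded amounts
theorem pv_foldl_sub {α : Type} (l : List α) (g : α → Int) (P : α → Prop) [DecidablePred P] (q : Int) :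
    l.foldl (fun q d => if P d then q - g d else q) q
      = q - (l.map (fun d => if P d then g d else 0)).sum := by
  induction l generalizing q with
  | nil => simp
  | cons a l ih =>
      simp only [List.foldl_cons, List.map_cons, List.sum_cons]
      by_cases h : P a
      · rw [if_pos h, if_pos h, ih]; ring
      · rw [if_neg h, if_neg h, ih]; ring

-- membership in B's (word, position) set
theorem pv_mem_present (new_l : List String) (w : String) (k : Int) :
    ((w, k) ∈ (PySem.List.enumerate new_l 0).foldl
        (fun s p => PySem.Set.add s (p.2, p.1)) PySem.Set.empty)
      ↔ (0 ≤ k ∧ k < (new_l.length : Int) ∧ PySem.List.pyGetD new_l k "" = w) := by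
  rw [PySem.Set.mem_foldl_add]
  constructor
  · rintro (h | ⟨p, hp, hpe⟩)
    · simp [PySem.Set.empty] at h
    · obtain ⟨j, hj, rfl⟩ := (PySem.List.mem_enumerate_iff _ _ _).mp hp
      simp only [Prod.mk.injEq] at hpe
      obtain ⟨rfl, rfl⟩ := hpe
      refine ⟨by omega, by simp; omega, ?_⟩
      rw [PySem.List.pyGetD_eq_getElem _ "" (by omega) (by simp; omega)]
      simp
  · rintro ⟨h0, hlt, hget⟩
    right
    refine ⟨((k : Int), new_l[k.toNat]'(by omega)), ?_, ?_⟩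
    · exact (PySem.List.mem_enumerate_iff _ _ _).mpr ⟨k.toNat, by omega, by simp [Prod.ext_iff]; omega⟩
    · rw [PySem.List.pyGetD_eq_getElem _ "" h0 hlt] at hget
      simp [hget]

-- one pass of the 11-wide window hits a single offset
theorem pv_window_delta (e : Int) :
    ((PySem.List.pyRange (-5) 6 1).map (fun d => if e = d then 5 - |d| else 0)).sum
      = if -5 ≤ e ∧ e ≤ 5 then 5 - |e| else 0 := by
  have hr : PySem.List.pyRange (-5) 6 1 = [-5, -4, -3, -2, -1, 0, 1, 2, 3, 4, 5] := by decide
  rw [hr]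
  by_cases h : -5 ≤ e ∧ e ≤ 5
  · obtain ⟨h1, h2⟩ := h
    interval_cases e <;> decide
  · rw [if_neg h]
    have hz : ∀ d ∈ ([-5, -4, -3, -2, -1, 0, 1, 2, 3, 4, 5] : List Int),
        (if e = d then 5 - |d| else 0) = 0 := by
      intro d hd
      refine if_neg ?_
      fin_cases hd <;> omega
    rw [List.map_congr_left hz]
    simp

-- the heart: 5·(count of w) minus the window corrections = the guarded min-sum
theorem pv_key (new_l : List String) (w : String) (i : Int) :
    5 * ((new_l.count w : Int))
      - ((PySem.List.pyRange (-5) 6 1).map (fun d =>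
          if (0 ≤ i + d ∧ i + d < (new_l.length : Int) ∧ PySem.List.pyGetD new_l (i + d) "" = w)
          then 5 - |d| else 0)).sum
    = ((PySem.List.enumerate new_l 0).map (pvTerm w i)).sum := by
  induction new_l using List.reverseRecOn with
  | nil =>
      have hz : ∀ d ∈ PySem.List.pyRange (-5) 6 1,
          (if (0 ≤ i + d ∧ i + d < (([] : List String).length : Int) ∧
               PySem.List.pyGetD ([] : List String) (i + d) "" = w) then 5 - |d| else 0) = 0 := by
        intro d _
        refine if_neg (fun h => ?_)
        have := h.1; have := h.2.1
        simp at *; omega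
      rw [List.map_congr_left hz]
      simp
  | append_singleton l x ih =>
      -- pointwise: the new window term is the old one plus the hit at position l.length
      have hpt : ∀ d ∈ PySem.List.pyRange (-5) 6 1,
          (if (0 ≤ i + d ∧ i + d < ((l ++ [x]).length : Int) ∧
               PySem.List.pyGetD (l ++ [x]) (i + d) "" = w) then 5 - |d| else 0)
          = (if (0 ≤ i + d ∧ i + d < (l.length : Int) ∧
               PySem.List.pyGetD l (i + d) "" = w) then 5 - |d| else 0)
            + (if (i + d = (l.length : Int) ∧ x = w) then 5 - |d| else 0) := by
        intro d _
        by_cases h0 : 0 ≤ i + d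
        · by_cases hin : i + d < (l.length : Int)
          · -- inside l: appended term irrelevant
            have hg : PySem.List.pyGetD (l ++ [x]) (i + d) "" = PySem.List.pyGetD l (i + d) "" := by
              rw [PySem.List.pyGetD_eq_getElem _ "" h0 (by simp; omega),
                  PySem.List.pyGetD_eq_getElem _ "" h0 hin]
              rw [List.getElem_append_left (by omega)]
            rw [hg, if_neg (by omega : ¬(i + d = (l.length : Int) ∧ x = w)), add_zero]
            refine if_congr ?_ rfl rfl
            constructor
            · rintro ⟨_, _, h⟩; exact ⟨h0, hin, h⟩
            · rintro ⟨_, _, h⟩; exact ⟨h0, by simp; omega, h⟩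
          · by_cases heq : i + d = (l.length : Int)
            · -- exactly the appended slot
              have hg : PySem.List.pyGetD (l ++ [x]) (i + d) "" = x := by
                rw [PySem.List.pyGetD_eq_getElem _ "" h0 (by simp; omega)]
                have : (i + d).toNat = l.length := by omega
                simp [this]
              rw [hg, if_neg (by omega : ¬(0 ≤ i + d ∧ i + d < (l.length : Int) ∧
                    PySem.List.pyGetD l (i + d) "" = w)), zero_add]
              refine if_congr ?_ rfl rfl
              constructor
              · rintro ⟨_, _, h⟩; exact ⟨heq, h⟩
              · rintro ⟨_, h⟩; exact ⟨h0, by simp; omega, h⟩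
            · -- beyond the appended list
              rw [if_neg (by simp; omega), if_neg (by omega),
                  if_neg (by omega : ¬(i + d = (l.length : Int) ∧ x = w))]
              simp
        · rw [if_neg (by omega), if_neg (by omega),
              if_neg (by omega : ¬(i + d = (l.length : Int) ∧ x = w))]
          simp
      rw [List.map_congr_left hpt, List.sum_map_add]
      -- the correction sum
      have hδ : ((PySem.List.pyRange (-5) 6 1).map (fun d =>
            if (i + d = (l.length : Int) ∧ x = w) then 5 - |d| else 0)).sum
          = if x = w then (if -5 ≤ (l.length : Int) - i ∧ (l.length : Int) - i ≤ 5
              then 5 - |(l.length : Int) - i| else 0) else 0 := by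
        by_cases hx : x = w
        · have : ∀ d ∈ PySem.List.pyRange (-5) 6 1,
              (if (i + d = (l.length : Int) ∧ x = w) then 5 - |d| else 0)
              = (if (l.length : Int) - i = d then 5 - |d| else 0) := by
            intro d _
            refine if_congr ?_ rfl rfl
            constructor
            · rintro ⟨h, _⟩; omega
            · intro h; exact ⟨by omega, hx⟩
          rw [List.map_congr_left this, pv_window_delta, if_pos hx]
        · have : ∀ d ∈ PySem.List.pyRange (-5) 6 1,
              (if (i + d = (l.length : Int) ∧ x = w) then 5 - |d| else 0) = 0 := by
            intro d _
            exact if_neg (fun h => hx h.2)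
          rw [List.map_congr_left this, if_neg hx]
          simp
      rw [hδ]
      rw [PySem.List.enumerate_append]
      simp only [List.map_append, List.sum_append, List.count_append]
      rw [← ih]
      have hterm : ((PySem.List.enumerate [x] (0 + (l.length : Int))).map (pvTerm w i)).sum
          = pvTerm w i (((l.length : Int)), x) := by
        simp [PySem.List.enumerate]
      rw [hterm]
      have habs : |i - (l.length : Int)| = |(l.length : Int) - i| := abs_sub_comm _ _
      by_cases hx : x = w
      · have hc1 : (List.count w [x] : Int) = 1 := by simp [hx]
        have hpt2 : pvTerm w i (((l.length : Int)), x) = min (|i - (l.length : Int)|) 5 := by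
          simp [pvTerm, hx.symm]
        rw [if_pos hx, hpt2]
        push_cast [hc1]
        by_cases hb : -5 ≤ (l.length : Int) - i ∧ (l.length : Int) - i ≤ 5
        · have h5 : |(l.length : Int) - i| ≤ 5 := abs_le.mpr hb
          have hmin : min (|i - (l.length : Int)|) 5 = |(l.length : Int) - i| := by
            rw [habs]; exact min_eq_left h5
          rw [if_pos hb, hmin]
          linarith [ih]
        · have h5 : 5 ≤ |(l.length : Int) - i| := by
            rcases abs_cases ((l.length : Int) - i) with ⟨h1, h2⟩ | ⟨h1, h2⟩ <;> omega
          have hmin : min (|i - (l.length : Int)|) 5 = 5 := by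
            rw [habs]; exact min_eq_right h5
          rw [if_neg hb, hmin]
          linarith [ih]
      · have hc0 : (List.count w [x] : Int) = 0 := by
          have h0 : List.count w [x] = 0 := List.count_eq_zero.mpr (by
            simp only [List.mem_singleton]
            exact fun h => hx h.symm)
          simp [h0]
        have hpt2 : pvTerm w i (((l.length : Int)), x) = 0 := by
          unfold pvTerm
          rw [if_neg (fun h : w = x => hx h.symm)]
        rw [if_neg hx, hpt2]
        push_cast [hc0]
        linarith [ih]

-- B's per-word step equals adding the guarded min-sum
theorem pv_innerB (new_l : List String) (w : String) (i q : Int) :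
    (if (new_l.foldl (fun d w => d.insert w (d.getD w 0 + 1)) (PySem.Dict.empty : PySem.Dict String Int)).contains w then
      (PySem.List.pyRange (-5) 6 1).foldl
        (fun q d => if (w, i + d) ∈ ((PySem.List.enumerate new_l 0).foldl
            (fun s p => PySem.Set.add s (p.2, p.1)) PySem.Set.empty) then q - (5 - |d|) else q)
        (q + 5 * (new_l.foldl (fun d w => d.insert w (d.getD w 0 + 1)) (PySem.Dict.empty : PySem.Dict String Int)).getD w 0)
    else q)
    = q + ((PySem.List.enumerate new_l 0).map (pvTerm w i)).sum := by
  by_cases hc : (new_l.foldl (fun d w => d.insert w (d.getD w 0 + 1)) (PySem.Dict.empty : PySem.Dict String Int)).contains w = true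
  · rw [if_pos hc, pv_foldl_sub, PySem.Dict.getD_foldl_insert_add_one]
    have hm : ∀ d ∈ PySem.List.pyRange (-5) 6 1,
        (if (w, i + d) ∈ (PySem.List.enumerate new_l 0).foldl
            (fun s p => PySem.Set.add s (p.2, p.1)) PySem.Set.empty then 5 - |d| else 0)
        = (if (0 ≤ i + d ∧ i + d < (new_l.length : Int) ∧
              PySem.List.pyGetD new_l (i + d) "" = w) then 5 - |d| else 0) := by
      intro d _
      exact if_congr (pv_mem_present new_l w (i + d)) rfl rfl
    rw [List.map_congr_left hm]
    have hk := pv_key new_l w i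
    simp only [PySem.Dict.getD_empty, zero_add]
    linarith [hk]
  · rw [if_neg hc]
    rw [PySem.Dict.foldl_insert_getD_add_one_eq_counter, PySem.Dict.contains_counter] at hc
    have hw : w ∉ new_l := by simpa using hc
    have hz : ∀ p ∈ PySem.List.enumerate new_l 0, pvTerm w i p = 0 := by
      intro p hp
      obtain ⟨j, hj, rfl⟩ := (PySem.List.mem_enumerate_iff _ _ _).mp hp
      have : w ≠ new_l[j] := fun h => hw (h ▸ List.getElem_mem hj)
      simp [pvTerm, this]
    rw [List.map_congr_left hz]
    simp

theorem sum_number_alt_eq (new_l : List String) (text_list : List String) :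
    sum_number_alt new_l text_list
      = (PySem.List.enumerate text_list 0).foldl (fun q p =>
          q + ((PySem.List.enumerate new_l 0).map (pvTerm p.2 p.1)).sum) 0 := by
  unfold sum_number_alt
  refine List.foldl_ext _ _ 0 (fun q p _ => ?_)
  exact pv_innerB new_l p.2 p.1 q

-- ===== VERDICT (by name: the statement is the Claim_ definition above) =====
theorem sum_number_spec : Claim_equal_sum_number := by
  intro new_l text_list _
  unfold Spec_sum_number
  rw [sum_number_eq, sum_number_alt_eq]
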